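-- pv_equiv track=rewrite | github.com/kmkholm/Dream-Cryptography | enhanced_dream_crypto POST V4.py | _count_semantic_matches
-- ===== SOURCE A (Python) =====
-- from typing import Dict, List, Tuple, Optional
--
-- def _count_semantic_matches(current: List[str], required: List[str]) -> int:
--     """Count semantic matches between symbol lists"""
--     semantic_groups = {
--         'movement': ['flying', 'soaring', 'floating', 'levitating'],
--         'change': ['transforming', 'changing', 'morphing', 'shifting'],
--         'water': ['ocean', 'river', 'lake', 'sea', 'water'],
--         'structure': ['house', 'building', 'home', 'room']
--     }
--
--     matches = 0
--     for req_symbol in required: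
--         for group_name, group_symbols in semantic_groups.items():
--             if req_symbol in group_symbols:
--                 # Check if any current symbol is in the same semantic group
--                 if any(curr_symbol in group_symbols for curr_symbol in current):
--                     matches += 1
--                     break
--
--     return matches
-- ===== SOURCE B (Python) =====
-- def _count_semantic_matches(current, required):
--     """Count semantic matches between symbol lists (group-wise decomposition)."""
--     semantic_groups = {
--         'movement': ['flying', 'soaring', 'floating', 'levitating'],
--         'change': ['transforming', 'changing', 'morphing', 'shifting'],
--         'water': ['ocean', 'river', 'lake', 'sea', 'water'],
--         'structure': ['house', 'building', 'home', 'room']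
--     }
--     total = 0
--     for group_symbols in semantic_groups.values():
--         if any(c in group_symbols for c in current):
--             total += sum(1 for r in required if r in group_symbols)
--     return total
-- ===== Notes on version B (the rewrite author's own statement) =====
-- stated objective: alternative
-- what changed: B loops over the semantic groups instead of over the required symbols: for each group it computes presence in current once and adds the count of required symbols in that group, instead of re-scanning current for every required symbol; correct because the groups are disjoint.
import Mathlib
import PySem

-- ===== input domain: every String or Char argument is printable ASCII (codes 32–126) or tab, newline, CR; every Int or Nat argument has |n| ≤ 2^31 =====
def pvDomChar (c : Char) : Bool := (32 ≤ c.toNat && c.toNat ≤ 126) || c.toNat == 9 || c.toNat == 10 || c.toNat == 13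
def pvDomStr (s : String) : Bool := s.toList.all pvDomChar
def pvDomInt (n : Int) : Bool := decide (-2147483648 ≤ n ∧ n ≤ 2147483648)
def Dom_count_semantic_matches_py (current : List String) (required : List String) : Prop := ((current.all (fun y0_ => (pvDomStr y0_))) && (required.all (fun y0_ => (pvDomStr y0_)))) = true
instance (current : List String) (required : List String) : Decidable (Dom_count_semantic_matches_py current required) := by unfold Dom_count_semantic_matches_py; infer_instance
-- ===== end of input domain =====

-- B loops over the groups (presence computed once per group, then a count of required symbols
-- in the group) instead of A's per-required-symbol scan with break; same result, groups disjoint.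

-- shared literal data: the semantic_groups dict as an association list (insertion order)
def pvSemGroups : List (String × List String) :=
  [("movement", ["flying", "soaring", "floating", "levitating"]),
   ("change", ["transforming", "changing", "morphing", "shifting"]),
   ("water", ["ocean", "river", "lake", "sea", "water"]),
   ("structure", ["house", "building", "home", "room"])]

-- ===== PORT A =====
-- A's inner 'for group_name, group_symbols in semantic_groups.items()' loop for one req_symbol:
-- 'break' fires only after 'matches += 1', so the recursion stops exactly there.
def pvAInner (current : List String) (req : String) (m : Int) : List (String × List String) → Int
  | [] => m
  | (_, gs) :: rest =>
    if req ∈ gs then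
      if current.any (fun c => decide (c ∈ gs)) then m + 1
      else pvAInner current req m rest
    else pvAInner current req m rest

def count_semantic_matches_py (current : List String) (required : List String) : Int :=
  required.foldl (fun m req => pvAInner current req m pvSemGroups) 0

-- ===== PORT B =====
def count_semantic_matches_py_alt (current : List String) (required : List String) : Int :=
  pvSemGroups.foldl
    (fun total p =>
      if current.any (fun c => decide (c ∈ p.2)) then
        total + ((required.filter (fun r => decide (r ∈ p.2))).length : Int)
      else total) 0

-- ===== PRECONDITION & SPEC =====
def Spec_count_semantic_matches_py (current : List String) (required : List String) (out : Int) : Prop := out = count_semantic_matches_py_alt current required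
instance (current : List String) (required : List String) (out : Int) : Decidable (Spec_count_semantic_matches_py current required out) := by unfold Spec_count_semantic_matches_py; infer_instance

-- ===== CLAIM (what is proved, stated in full; the proofs are below) =====
def Claim_equal_count_semantic_matches_py : Prop := ∀ (current : List String) (required : List String), Dom_count_semantic_matches_py current required → Spec_count_semantic_matches_py current required (count_semantic_matches_py current required)

-- ===== LEMMAS AND PROOFS =====

-- A's inner loop adds its contribution to whatever accumulator it starts from
lemma pvAInner_acc (current : List String) (req : String) (m : Int) :
    pvAInner current req m pvSemGroups = m + pvAInner current req 0 pvSemGroups := by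
  simp only [pvSemGroups, pvAInner]
  split_ifs <;> ring

lemma pvFold_acc (current : List String) (m : Int) (xs : List String) :
    xs.foldl (fun m req => pvAInner current req m pvSemGroups) m
      = m + xs.foldl (fun m req => pvAInner current req m pvSemGroups) 0 := by
  induction xs generalizing m with
  | nil => simp
  | cons x xs ih =>
    simp only [List.foldl]
    rw [pvAInner_acc, ih, ih (pvAInner current x 0 pvSemGroups)]
    ring

lemma pvA_cons (current : List String) (r : String) (rest : List String) :
    count_semantic_matches_py current (r :: rest) =
      pvAInner current r 0 pvSemGroups + count_semantic_matches_py current rest := by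
  unfold count_semantic_matches_py
  simp only [List.foldl]
  rw [pvAInner_acc, zero_add, pvFold_acc]

-- group disjointness: a string in one group's list is in no other
lemma pv_disj (r : String) : (r ∈ ["flying", "soaring", "floating", "levitating"] →
      r ∉ ["transforming", "changing", "morphing", "shifting"] ∧
      r ∉ ["ocean", "river", "lake", "sea", "water"] ∧
      r ∉ ["house", "building", "home", "room"]) ∧
    (r ∈ ["transforming", "changing", "morphing", "shifting"] →
      r ∉ ["ocean", "river", "lake", "sea", "water"] ∧
      r ∉ ["house", "building", "home", "room"]) ∧
    (r ∈ ["ocean", "river", "lake", "sea", "water"] →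
      r ∉ ["house", "building", "home", "room"]) := by
  refine ⟨fun h => ?_, fun h => ?_, fun h => ?_⟩ <;> fin_cases h <;> decide

set_option maxHeartbeats 2000000 in
lemma pvB_cons (current : List String) (r : String) (rest : List String) :
    count_semantic_matches_py_alt current (r :: rest) =
      pvAInner current r 0 pvSemGroups + count_semantic_matches_py_alt current rest := by
  obtain ⟨d1, d2, d3⟩ := pv_disj r
  simp only [count_semantic_matches_py_alt, pvSemGroups, pvAInner, List.foldl,
    List.filter_cons, decide_eq_true_eq]
  split_ifs <;>
    (try (exfalso; first
          | exact (d1 (by assumption)).1 (by assumption)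
          | exact (d1 (by assumption)).2.1 (by assumption)
          | exact (d1 (by assumption)).2.2 (by assumption)
          | exact (d2 (by assumption)).1 (by assumption)
          | exact (d2 (by assumption)).2 (by assumption)
          | exact (d3 (by assumption)) (by assumption))) <;>
    (first
      | (simp only [List.length_cons]; push_cast; ring)
      | (push_cast; ring)
      | simp)

lemma pv_main (current : List String) (required : List String) :
    count_semantic_matches_py current required = count_semantic_matches_py_alt current required := by
  induction required with
  | nil =>
    simp only [count_semantic_matches_py, count_semantic_matches_py_alt, pvSemGroups,
      List.foldl, List.filter_nil, List.length_nil]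
    split_ifs <;> simp
  | cons r rest ih => rw [pvA_cons, pvB_cons, ih]

-- ===== VERDICT (by name: the statement is the Claim_ definition above) =====
theorem count_semantic_matches_py_spec : Claim_equal_count_semantic_matches_py := by
  intro current required _
  exact pv_main current required
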